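-- pv_equiv track=rewrite | github.com/howyoungchen/deepRolePlay | utils/messages_process.py | auto_find_ai_message_index
-- ===== SOURCE A (Python) =====
-- from typing import List, Dict, Any
--
-- def auto_find_ai_message_index(messages: List[Dict[str, Any]]) -> int:
--     """
--     从消息列表的尾部开始，查找第一个内容长度大于100的AI消息，返回其倒数索引
--     只检查最近5个AI消息，避免消耗过多算力
--
--     Args:
--         messages: 消息列表
--
--     Returns:
--         倒数索引值 (1=最后一个AI消息, 2=倒数第二个, 以此类推)
--         如果没找到符合条件的AI消息，返回1
--     """
--     # 从消息尾部开始遍历，边找边检查，最多检查5个AI消息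
--     ai_count = 0
--
--     for msg in reversed(messages):
--         if msg.get("role") == "assistant":
--             ai_count += 1
--             content = msg.get("content", "")
--             if len(content) > 100:
--                 # 找到第一个符合条件的，直接返回倒数索引
--                 return ai_count
--             if ai_count >= 5:  # 已检查5个AI消息，停止
--                 break
--
--     # 如果检查了AI消息但都不符合条件，或者没有AI消息
--
--     # 如果没找到符合条件的，回退到最后一个AI消息
--     return 1
-- ===== SOURCE B (Python) =====
-- from typing import List, Dict, Any
--
-- def auto_find_ai_message_index(messages: List[Dict[str, Any]]) -> int:
--     # Single forward pass (no reversal): count assistant messages and remember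
--     # the forward ordinal of the most recent long-content one; convert to a
--     # reverse index arithmetically at the end.
--     total = 0
--     last_long = None
--     for msg in messages:
--         if msg.get("role") == "assistant":
--             total += 1
--             if len(msg.get("content", "")) > 100:
--                 last_long = total
--     if last_long is not None and total - last_long < 5:
--         return total - last_long + 1
--     return 1
-- ===== Notes on version B (the rewrite author's own statement) =====
-- stated objective: alternative
-- what changed: Replaced A's reverse-order count-and-check loop with a single forward pass (no reversal, no early exit) that counts assistant messages and records the forward ordinal of the most recent long one, converting it to a reverse index arithmetically at the end.
import Mathlib
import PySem

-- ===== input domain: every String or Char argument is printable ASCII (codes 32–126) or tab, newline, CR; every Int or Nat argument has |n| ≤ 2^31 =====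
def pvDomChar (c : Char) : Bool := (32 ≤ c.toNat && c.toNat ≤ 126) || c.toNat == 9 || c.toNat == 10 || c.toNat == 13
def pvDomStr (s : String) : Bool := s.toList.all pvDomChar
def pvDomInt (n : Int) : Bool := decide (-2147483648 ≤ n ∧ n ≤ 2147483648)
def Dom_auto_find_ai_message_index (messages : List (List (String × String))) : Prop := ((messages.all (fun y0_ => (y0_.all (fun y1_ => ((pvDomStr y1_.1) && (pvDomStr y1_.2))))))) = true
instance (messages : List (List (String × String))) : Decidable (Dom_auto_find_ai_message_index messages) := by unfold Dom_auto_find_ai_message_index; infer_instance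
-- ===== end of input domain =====

-- B replaces A's reverse-order count-and-check loop by a single forward pass that
-- records the forward ordinal of the most recent long assistant message and turns
-- it into a reverse index arithmetically; objective: alternative decomposition.

-- ===== PORT A =====
-- msg.get(k) / msg.get(k, dflt) on the association list (first match wins)
def pvGetMsg (m : List (String × String)) (k : String) : Option String :=
  (m.find? (fun p => p.1 == k)).map (·.2)

-- A's loop over reversed(messages), carrying the running assistant count
def pvLoopA : List (List (String × String)) → Nat → Int
  | [], _ => 1
  | m :: rest, cnt =>
    if pvGetMsg m "role" == some "assistant" then
      let cnt' := cnt + 1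
      let content := (pvGetMsg m "content").getD ""
      if PySem.Str.len content > 100 then (cnt' : Int)
      else if 5 ≤ cnt' then 1
      else pvLoopA rest cnt'
    else pvLoopA rest cnt

def auto_find_ai_message_index (messages : List (List (String × String))) : Int :=
  pvLoopA messages.reverse 0

-- ===== PORT B =====
-- B's forward loop: state (total assistants so far, ordinal of the last long one)
def pvFoldB : List (List (String × String)) → Nat × Option Nat → Nat × Option Nat
  | [], s => s
  | m :: rest, (total, lastLong) =>
    if pvGetMsg m "role" == some "assistant" then
      let total' := total + 1
      if PySem.Str.len ((pvGetMsg m "content").getD "") > 100 then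
        pvFoldB rest (total', some total')
      else
        pvFoldB rest (total', lastLong)
    else pvFoldB rest (total, lastLong)

def auto_find_ai_message_index_alt (messages : List (List (String × String))) : Int :=
  let s := pvFoldB messages (0, none)
  match s.2 with
  | some j => if s.1 - j < 5 then ((s.1 - j + 1 : Nat) : Int) else 1
  | none => 1

-- ===== PRECONDITION & SPEC =====
def Spec_auto_find_ai_message_index (messages : List (List (String × String))) (out : Int) : Prop := out = auto_find_ai_message_index_alt messages
instance (messages : List (List (String × String))) (out : Int) : Decidable (Spec_auto_find_ai_message_index messages out) := by unfold Spec_auto_find_ai_message_index; infer_instance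

-- ===== CLAIM (what is proved, stated in full; the proofs are below) =====
def Claim_equal_auto_find_ai_message_index : Prop := ∀ (messages : List (List (String × String))), Dom_auto_find_ai_message_index messages → Spec_auto_find_ai_message_index messages (auto_find_ai_message_index messages)

-- ===== LEMMAS AND PROOFS =====
-- ===== LEMMAS AND PROOFS =====
-- predicates naming the two tests both ports perform
def pvIsA (m : List (String × String)) : Bool := pvGetMsg m "role" == some "assistant"
def pvIsLong (m : List (String × String)) : Bool :=
  PySem.Str.len ((pvGetMsg m "content").getD "") > 100

theorem pvLoopA_char (l : List (List (String × String))) :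
    ∀ cnt : Nat, cnt < 5 →
      pvLoopA l cnt =
        match (l.filter pvIsA).findIdx? pvIsLong with
        | some p => if cnt + p < 5 then ((cnt + p + 1 : Nat) : Int) else 1
        | none => 1 := by
  induction l with
  | nil => intro cnt _; simp [pvLoopA]
  | cons m rest ih =>
    intro cnt hcnt
    by_cases hA : pvIsA m = true
    · by_cases hL : pvIsLong m = true
      · have hA' : (pvGetMsg m "role" == some "assistant") = true := hA
        have hL' : PySem.Str.len ((pvGetMsg m "content").getD "") > 100 := by
          simpa [pvIsLong] using hL
        rw [List.filter_cons, if_pos hA, List.findIdx?_cons, if_pos hL]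
        show (if (pvGetMsg m "role" == some "assistant") = true then _ else _) = _
        rw [if_pos hA', if_pos hL']
        simp only
        rw [if_pos (by omega)]
      · have hA' : (pvGetMsg m "role" == some "assistant") = true := hA
        have hL' : ¬ PySem.Str.len ((pvGetMsg m "content").getD "") > 100 := by
          simpa [pvIsLong] using hL
        rw [List.filter_cons, if_pos hA, List.findIdx?_cons]
        rw [if_neg (show ¬ pvIsLong m = true from hL)]
        show (if (pvGetMsg m "role" == some "assistant") = true then _ else _) = _
        rw [if_pos hA', if_neg hL']
        by_cases h5 : 5 ≤ cnt + 1
        · rw [if_pos h5]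
          cases h : (rest.filter pvIsA).findIdx? pvIsLong with
          | none => simp
          | some p => simp only [Option.map_some]; rw [if_neg (by omega)]
        · rw [if_neg h5, ih (cnt + 1) (by omega)]
          cases h : (rest.filter pvIsA).findIdx? pvIsLong with
          | none => simp
          | some p =>
            simp only [Option.map_some]
            have e1 : cnt + 1 + p = cnt + (p + 1) := by omega
            rw [e1]
    · have hA' : ¬ (pvGetMsg m "role" == some "assistant") = true := hA
      rw [List.filter_cons, if_neg hA]
      show (if (pvGetMsg m "role" == some "assistant") = true then _ else _) = _
      rw [if_neg hA']
      exact ih cnt hcnt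

theorem pvFoldB_char (l : List (List (String × String))) :
    ∀ (t0 : Nat) (lj0 : Option Nat),
      pvFoldB l (t0, lj0) =
        (t0 + (l.filter pvIsA).length,
         match ((l.filter pvIsA).reverse.findIdx? pvIsLong) with
         | some p => some (t0 + (l.filter pvIsA).length - p)
         | none => lj0) := by
  induction l with
  | nil => intro t0 lj0; simp [pvFoldB]
  | cons m rest ih =>
    intro t0 lj0
    by_cases hA : pvIsA m = true
    · have hA' : (pvGetMsg m "role" == some "assistant") = true := hA
      rw [List.filter_cons, if_pos hA]
      have hrev : (m :: rest.filter pvIsA).reverse = (rest.filter pvIsA).reverse ++ [m] := by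
        simp
      rw [hrev, List.findIdx?_append]
      show (if (pvGetMsg m "role" == some "assistant") = true then _ else _) = _
      rw [if_pos hA']
      by_cases hL : pvIsLong m = true
      · have hL' : PySem.Str.len ((pvGetMsg m "content").getD "") > 100 := by
          simpa [pvIsLong] using hL
        rw [if_pos hL', ih (t0 + 1) (some (t0 + 1))]
        cases h : ((rest.filter pvIsA).reverse).findIdx? pvIsLong with
        | none =>
          simp only [Option.none_or, List.findIdx?_cons, if_pos hL,
            Option.map_some, List.findIdx?_nil, List.length_reverse]
          refine Prod.ext (by simp; omega) ?_
          simp only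
          exact congrArg some (by simp; omega)
        | some p =>
          have hp : p < (rest.filter pvIsA).length := by
            have := (List.findIdx?_eq_some_iff_getElem.mp h).fst
            simpa using this
          simp only [Option.some_or]
          refine Prod.ext (by simp; omega) ?_
          simp only
          exact congrArg some (by simp; omega)
      · have hL' : ¬ PySem.Str.len ((pvGetMsg m "content").getD "") > 100 := by
          simpa [pvIsLong] using hL
        rw [if_neg hL', ih (t0 + 1) lj0]
        cases h : ((rest.filter pvIsA).reverse).findIdx? pvIsLong with
        | none =>
          simp only [Option.none_or, List.findIdx?_cons,
            if_neg (show ¬ pvIsLong m = true from hL),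
            List.findIdx?_nil, Option.map_none]
          exact Prod.ext (by simp; omega) rfl
        | some p =>
          have hp : p < (rest.filter pvIsA).length := by
            have := (List.findIdx?_eq_some_iff_getElem.mp h).fst
            simpa using this
          simp only [Option.some_or]
          refine Prod.ext (by simp; omega) ?_
          simp only
          exact congrArg some (by simp; omega)
    · have hA' : ¬ (pvGetMsg m "role" == some "assistant") = true := hA
      rw [List.filter_cons, if_neg hA]
      show (if (pvGetMsg m "role" == some "assistant") = true then _ else _) = _
      rw [if_neg hA']
      exact ih t0 lj0

-- ===== VERDICT (by name: the statement is the Claim_ definition above) =====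
theorem auto_find_ai_message_index_spec : Claim_equal_auto_find_ai_message_index := by
  intro messages _
  unfold Spec_auto_find_ai_message_index auto_find_ai_message_index auto_find_ai_message_index_alt
  rw [pvLoopA_char messages.reverse 0 (by omega), pvFoldB_char messages 0 none]
  have hfr : messages.reverse.filter pvIsA = (messages.filter pvIsA).reverse := by
    simp [List.filter_reverse]
  rw [hfr]
  cases h : ((messages.filter pvIsA).reverse).findIdx? pvIsLong with
  | none => simp
  | some p =>
    have hp : p < (messages.filter pvIsA).length := by
      have := (List.findIdx?_eq_some_iff_getElem.mp h).fst
      simpa using this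
    simp only [Nat.zero_add, Nat.sub_sub_self (le_of_lt hp)]
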